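-- pv_equiv track=rewrite | github.com/Luffy20260323/OpenClaw_Camera_Construction_Mgmt | scripts/fix_api_permissions.py | check_duplicate_permission_keys
-- ===== SOURCE A (Python) =====
-- from typing import Dict, List, Tuple
--
-- def check_duplicate_permission_keys(permission_keys: List[Tuple[int, str]]) -> List[Tuple[str, List[int]]]:
--     """检查重复的权限码"""
--     key_map = {}
--     for resource_id, perm_key in permission_keys:
--         if perm_key not in key_map:
--             key_map[perm_key] = []
--         key_map[perm_key].append(resource_id)
--
--     # 返回重复的权限码及其对应的资源ID
--     duplicates = [(key, ids) for key, ids in key_map.items() if len(ids) > 1]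
--     return duplicates
-- ===== SOURCE B (Python) =====
-- from typing import Dict, List, Tuple
--
-- def check_duplicate_permission_keys(permission_keys: List[Tuple[int, str]]) -> List[Tuple[str, List[int]]]:
--     """检查重复的权限码 — count-first, collect-second two-pass version."""
--     cnt = {}
--     for _, perm_key in permission_keys:
--         cnt[perm_key] = cnt.get(perm_key, 0) + 1
--     result = {}
--     for resource_id, perm_key in permission_keys:
--         if cnt[perm_key] > 1:
--             result[perm_key] = result.get(perm_key, []) + [resource_id]
--     return list(result.items())
-- ===== Notes on version B (the rewrite author's own statement) =====
-- stated objective: alternative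
-- what changed: B first builds a frequency table of the permission keys, then in a second pass collects resource ids only for keys that occur more than once, so the grouped-then-filtered dict of A disappears; output order (first-appearance keys, encounter-order ids) is identical.
import Mathlib
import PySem

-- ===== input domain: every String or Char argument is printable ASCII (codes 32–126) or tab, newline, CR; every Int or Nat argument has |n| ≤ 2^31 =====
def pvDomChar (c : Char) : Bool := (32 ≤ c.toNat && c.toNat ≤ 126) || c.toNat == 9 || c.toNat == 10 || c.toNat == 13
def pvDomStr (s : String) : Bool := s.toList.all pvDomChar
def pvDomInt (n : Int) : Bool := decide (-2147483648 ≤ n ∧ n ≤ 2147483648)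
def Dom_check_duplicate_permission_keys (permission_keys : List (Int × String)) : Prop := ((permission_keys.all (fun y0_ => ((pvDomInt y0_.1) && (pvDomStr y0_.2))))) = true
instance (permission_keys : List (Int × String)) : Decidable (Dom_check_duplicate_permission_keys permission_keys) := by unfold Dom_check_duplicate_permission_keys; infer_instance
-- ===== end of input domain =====

-- B restructures A's group-everything-then-filter into a count-first, collect-second two-pass; same output, same cost.

-- ===== PORT A =====
-- key_map = {}; for resource_id, perm_key: if perm_key not in key_map: key_map[perm_key] = []; key_map[perm_key].append(resource_id)
-- (= key_map[perm_key] = key_map.get(perm_key, []) + [resource_id], i.e. Dict.modify); then keep items with len(ids) > 1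
def check_duplicate_permission_keys (permission_keys : List (Int × String)) : List (String × List Int) :=
  let key_map : PySem.Dict String (List Int) :=
    permission_keys.foldl (fun d p => d.modify p.2 [] (· ++ [p.1])) PySem.Dict.empty
  key_map.items.filter (fun kv => kv.2.length > 1)

-- ===== PORT B =====
-- cnt[perm_key] = cnt.get(perm_key, 0) + 1 ; then collect ids only for keys with cnt > 1
def check_duplicate_permission_keys_alt (permission_keys : List (Int × String)) : List (String × List Int) :=
  let cnt : PySem.Dict String Int :=
    permission_keys.foldl (fun d p => d.modify p.2 0 (· + 1)) PySem.Dict.empty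
  let result : PySem.Dict String (List Int) :=
    permission_keys.foldl
      (fun d p => if cnt.getD p.2 0 > 1 then d.modify p.2 [] (· ++ [p.1]) else d)
      PySem.Dict.empty
  result.items

-- ===== PRECONDITION & SPEC =====
def Spec_check_duplicate_permission_keys (permission_keys : List (Int × String)) (out : List (String × List Int)) : Prop := out = check_duplicate_permission_keys_alt permission_keys
instance (permission_keys : List (Int × String)) (out : List (String × List Int)) : Decidable (Spec_check_duplicate_permission_keys permission_keys out) := by unfold Spec_check_duplicate_permission_keys; infer_instance

-- ===== CLAIM (what is proved, stated in full; the proofs are below) =====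
def Claim_equal_check_duplicate_permission_keys : Prop := ∀ (permission_keys : List (Int × String)), Dom_check_duplicate_permission_keys permission_keys → Spec_check_duplicate_permission_keys permission_keys (check_duplicate_permission_keys permission_keys)

-- ===== LEMMAS AND PROOFS =====

-- set(xs filtered) = set(xs) filtered (first occurrences in order)
theorem ofList_filter {α : Type} [BEq α] [LawfulBEq α] (q : α → Bool) (xs : List α) :
    PySem.Set.ofList (xs.filter q) = (PySem.Set.ofList xs).filter q := by
  induction xs using List.reverseRecOn with
  | nil => simp [PySem.Set.ofList_nil]
  | append_singleton xs x ih =>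
    by_cases hq : q x = true
    · rw [List.filter_append, List.filter_singleton]
      simp only [hq, cond_true]
      rw [PySem.Set.ofList_append_singleton, PySem.Set.ofList_append_singleton, ih,
        PySem.Set.add_eq_ite, PySem.Set.add_eq_ite]
      by_cases hx : x ∈ PySem.Set.ofList xs
      · rw [if_pos hx, if_pos (by simp [List.mem_filter, hx, hq])]
      · rw [if_neg hx, if_neg (fun h => hx (List.mem_filter.mp h).1), List.filter_append,
          List.filter_singleton]
        simp [hq]
    · rw [List.filter_append, List.filter_singleton]
      simp only [hq, cond_false, List.append_nil]
      rw [PySem.Set.ofList_append_singleton, ih, PySem.Set.add_eq_ite]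
      by_cases hx : x ∈ PySem.Set.ofList xs
      · rw [if_pos hx]
      · rw [if_neg hx, List.filter_append, List.filter_singleton]
        simp [hq]

-- the grouping loop, characterised: keys = first occurrences of the perm keys, values = ids in encounter order
theorem groupDict_items (l : List (Int × String)) :
    (l.foldl (fun d p => d.modify p.2 [] (· ++ [p.1]))
        (PySem.Dict.empty : PySem.Dict String (List Int))).items
      = (PySem.Set.ofList (l.map (·.2))).map
          (fun k => (k, (l.filter (fun p => p.2 == k)).map (·.1))) := by
  have hnd : (l.foldl (fun d p => d.modify p.2 [] (· ++ [p.1]))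
      (PySem.Dict.empty : PySem.Dict String (List Int))).keys.Nodup := by
    exact PySem.Dict.nodup_keys_foldl_modify_key l (·.2) [] (fun d x => (· ++ [x.1])) _
      PySem.Dict.nodup_keys_empty
  rw [PySem.Dict.items_eq_map_keys _ hnd []]
  rw [PySem.Dict.keys_foldl_modify_key]
  rw [PySem.Dict.keys_empty, PySem.Set.update_nil_left]
  apply List.map_congr_left
  intro k _
  have hswap : l.foldl (fun d p => d.modify p.2 [] (· ++ [p.1]))
      (PySem.Dict.empty : PySem.Dict String (List Int))
      = (l.map Prod.swap).foldl (fun d p => d.modify p.1 [] (· ++ [p.2])) PySem.Dict.empty := by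
    rw [List.foldl_map]; rfl
  rw [hswap, PySem.Dict.getD_foldl_modify_append, PySem.Dict.getD_empty, List.nil_append,
    List.filter_map, List.map_map]
  rfl

-- the counting loop computes occurrence counts
theorem cnt_getD (l : List (Int × String)) (k : String) :
    (l.foldl (fun d p => d.modify p.2 0 (· + 1))
        (PySem.Dict.empty : PySem.Dict String Int)).getD k 0
      = ((l.map (·.2)).count k : Int) := by
  have h : l.foldl (fun d p => d.modify p.2 0 (· + 1))
      (PySem.Dict.empty : PySem.Dict String Int)
      = (l.map (·.2)).foldl (fun d x => d.modify x 0 (· + 1)) PySem.Dict.empty := by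
    rw [List.foldl_map]
  rw [h, PySem.Dict.getD_foldl_modify_add_one, PySem.Dict.getD_empty, zero_add]

theorem glen (l : List (Int × String)) (k : String) :
    ((l.filter (fun p => p.2 == k)).map (·.1)).length = (l.map (·.2)).count k := by
  induction l with
  | nil => rfl
  | cons p t ih =>
    by_cases h : p.2 == k
    · simp [ih, eq_of_beq h]
    · simp [h, List.count_cons, ih]

theorem core (l : List (Int × String)) :
    ((PySem.Set.ofList (l.map (·.2))).map
        (fun k => (k, (l.filter (fun p => p.2 == k)).map (·.1)))).filter
      (fun kv => kv.2.length > 1)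
    = (PySem.Set.ofList
          ((l.filter (fun p => decide (1 < (l.map (·.2)).count p.2))).map (·.2))).map
        (fun k => (k,
          ((l.filter (fun p => decide (1 < (l.map (·.2)).count p.2))).filter
              (fun p => p.2 == k)).map (·.1))) := by
  have hcomp : (fun p : Int × String => decide (1 < (l.map (·.2)).count p.2))
      = (fun k => decide (1 < (l.map (·.2)).count k)) ∘ (·.2) := rfl
  rw [List.filter_map]
  rw [hcomp, ← List.filter_map (f := fun x : Int × String => x.2)
    (p := fun k => decide (1 < (l.map (fun x : Int × String => x.2)).count k)), ofList_filter]
  have hPf : ∀ k ∈ PySem.Set.ofList (l.map (·.2)),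
      ((fun kv : String × List Int => decide (kv.2.length > 1)) ∘
        (fun k => (k, (l.filter (fun p => p.2 == k)).map (·.1)))) k
      = (fun k => decide (1 < (l.map (·.2)).count k)) k := by
    intro k _
    simp only [Function.comp_apply, gt_iff_lt, glen]
  rw [List.filter_congr hPf]
  apply List.map_congr_left
  intro k hk
  have hq : decide (1 < (l.map (·.2)).count k) = true := (List.mem_filter.mp hk).2
  have harg : ((l.filter (fun p => decide (1 < (l.map (·.2)).count p.2))).filter
        (fun p => p.2 == k))
      = l.filter (fun p => p.2 == k) := by
    rw [List.filter_filter]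
    apply List.filter_congr
    intro p _
    by_cases h : p.2 == k
    · simp only [h]
      rw [eq_of_beq h]
      exact hq
    · simp [h]
  rw [← hcomp, harg]

theorem main_lemma : ∀ (l : List (Int × String)),
    check_duplicate_permission_keys l = check_duplicate_permission_keys_alt l := by
  intro l
  unfold check_duplicate_permission_keys check_duplicate_permission_keys_alt
  simp only [cnt_getD, gt_iff_lt, Nat.one_lt_cast]
  rw [PySem.List.foldl_ite_eq_foldl_filter]
  rw [groupDict_items, groupDict_items]
  exact core l

-- ===== VERDICT (by name: the statement is the Claim_ definition above) =====
theorem check_duplicate_permission_keys_spec : Claim_equal_check_duplicate_permission_keys := by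
  intro l _
  exact main_lemma l
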